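-- pv_equiv track=rewrite | github.com/adamr814/College_Course_Code | CSCI 160/Lab 12/Lab 12 Part 2.py | least_expensive_part
-- ===== SOURCE A (Python) =====
-- def least_expensive_part(d):
--     i = 10000000
--     lEP = []
--     for (key, value) in d.items():
--         if value == i:
--             lEP.append(key)
--         elif value < i:
--             lEP = []
--             i = value
--             lEP.append(key)
--     return lEP
-- ===== SOURCE B (Python) =====
-- def least_expensive_part(d):
--     m = 10000000
--     for value in d.values():
--         m = min(m, value)
--     return [key for key, value in d.items() if value == m]
-- ===== Notes on version B (the rewrite author's own statement) =====
-- stated objective: simpler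
-- what changed: Replaces A's single interleaved scan that tracks the running minimum and resets/rebuilds the result list in place with two plainly-shaped passes: first compute the minimum value (seeded with A's 10000000 cap), then filter the keys whose value equals it.
import Mathlib
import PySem

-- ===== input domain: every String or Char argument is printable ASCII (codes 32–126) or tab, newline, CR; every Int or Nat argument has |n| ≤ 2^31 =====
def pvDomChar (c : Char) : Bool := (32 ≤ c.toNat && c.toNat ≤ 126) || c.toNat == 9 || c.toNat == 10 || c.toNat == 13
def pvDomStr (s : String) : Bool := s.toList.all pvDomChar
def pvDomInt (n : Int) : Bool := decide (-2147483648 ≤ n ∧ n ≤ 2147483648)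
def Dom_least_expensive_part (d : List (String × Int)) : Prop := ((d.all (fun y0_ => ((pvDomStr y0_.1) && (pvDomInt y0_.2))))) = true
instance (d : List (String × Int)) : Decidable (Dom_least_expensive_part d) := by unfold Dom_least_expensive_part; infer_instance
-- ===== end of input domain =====

-- B replaces A's interleaved track-the-minimum-and-reset scan by two plain passes
-- (fold the minimum, then filter the keys equal to it); same O(n) cost, simpler shape.


-- ===== PORT A =====
-- A tracks the running minimum i and the list lEP together in one loop,
-- appending on a tie and resetting lEP on a new minimum.
def least_expensive_part (d : List (String × Int)) : List String :=
  (d.foldl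
    (fun (s : Int × List String) kv =>
      if kv.2 = s.1 then (s.1, s.2 ++ [kv.1])
      else if kv.2 < s.1 then (kv.2, [kv.1])
      else s)
    ((10000000 : Int), ([] : List String))).2

-- ===== PORT B =====
-- B: first pass folds the minimum value (seeded with 10000000), second pass filters.
def least_expensive_part_alt (d : List (String × Int)) : List String :=
  let m : Int := d.foldl (fun m kv => min m kv.2) 10000000
  (d.filter (fun kv => kv.2 = m)).map Prod.fst

-- ===== PRECONDITION & SPEC =====
def Spec_least_expensive_part (d : List (String × Int)) (out : List String) : Prop := out = least_expensive_part_alt d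
instance (d : List (String × Int)) (out : List String) : Decidable (Spec_least_expensive_part d out) := by unfold Spec_least_expensive_part; infer_instance

-- ===== CLAIM (what is proved, stated in full; the proofs are below) =====
def Claim_equal_least_expensive_part : Prop := ∀ (d : List (String × Int)), Dom_least_expensive_part d → Spec_least_expensive_part d (least_expensive_part d)

-- ===== LEMMAS AND PROOFS =====

theorem minfold_le (xs : List (String × Int)) (i : Int) :
    xs.foldl (fun m kv => min m kv.2) i ≤ i := by
  induction xs generalizing i with
  | nil => simp
  | cons kv rest ih =>
    simpa using le_trans (ih (min i kv.2)) (min_le_left _ _)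

-- A's loop from state (i, lep) keeps lep iff no smaller value appears, then appends the keys of the overall minimum.
theorem loopA_eq (xs : List (String × Int)) (i : Int) (lep : List String) :
    (xs.foldl
      (fun (s : Int × List String) kv =>
        if kv.2 = s.1 then (s.1, s.2 ++ [kv.1])
        else if kv.2 < s.1 then (kv.2, [kv.1])
        else s)
      (i, lep)).2 =
    (if xs.foldl (fun m kv => min m kv.2) i = i then lep else []) ++
      (xs.filter (fun kv => kv.2 = xs.foldl (fun m kv => min m kv.2) i)).map Prod.fst := by
  induction xs generalizing i lep with
  | nil => simp
  | cons kv rest ih =>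
    rcases lt_trichotomy kv.2 i with hlt | heq | hgt
    · -- new minimum: lep is reset to [kv.1]
      have hmin : min i kv.2 = kv.2 := min_eq_right hlt.le
      have hM : rest.foldl (fun m kv => min m kv.2) kv.2 ≤ kv.2 := minfold_le _ _
      simp only [List.foldl_cons, hmin, if_neg (ne_of_lt hlt), if_pos hlt]
      rw [ih]
      have hMi : rest.foldl (fun m kv => min m kv.2) kv.2 ≠ i := fun h => absurd (h ▸ hM) (not_le.2 hlt)
      rw [if_neg hMi]
      by_cases h : rest.foldl (fun m kv => min m kv.2) kv.2 = kv.2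
      · simp [h]
      · simp [h, Ne.symm h]
    · -- tie with the running minimum: kv.1 appended
      subst heq
      have hmin : min kv.2 kv.2 = kv.2 := min_self _
      simp only [List.foldl_cons, hmin]
      rw [ih]
      by_cases h : rest.foldl (fun m kv => min m kv.2) kv.2 = kv.2
      · simp [h]
      · simp [h, Ne.symm h]
    · -- larger value: skipped
      have hmin : min i kv.2 = i := min_eq_left hgt.le
      have hM : rest.foldl (fun m kv => min m kv.2) i ≤ i := minfold_le _ _
      have hne : kv.2 ≠ rest.foldl (fun m kv => min m kv.2) i :=
        fun h => absurd (h ▸ hM) (not_le.2 hgt)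
      simp only [List.foldl_cons, hmin, if_neg (ne_of_gt hgt), if_neg (not_lt.2 hgt.le)]
      rw [ih]
      simp [hne]

-- ===== VERDICT (by name: the statement is the Claim_ definition above) =====
theorem least_expensive_part_spec : Claim_equal_least_expensive_part := by
  intro d _
  unfold Spec_least_expensive_part least_expensive_part least_expensive_part_alt
  rw [loopA_eq]
  simp
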